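-- pv_equiv track=rewrite | github.com/flashman/code-samples | benchling/q11/q11.py | _generate
-- ===== SOURCE A (Python) =====
-- def _generate(sequences, sequence_map):
--     next_sequnces = []
--     for seq in sequences:
--         yield seq
--         end = seq[2]
--         if end in sequence_map:
--             for next_seq in sequence_map[end]:
--                 next_sequnces.append(_reduce(seq, next_seq))
--
--     if next_sequnces:
--         yield from _generate(next_sequnces, sequence_map)
--
-- def _reduce(base, seq):
--     return (base[0] + "_" + seq[0], base[1], seq[2])
-- ===== SOURCE B (Python) =====
-- def _generate(sequences, sequence_map):
--     frontier = list(sequences)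
--     while frontier:
--         yield from frontier
--         frontier = [_reduce(s, n)
--                     for s in frontier if s[2] in sequence_map
--                     for n in sequence_map[s[2]]]
--
--
-- def _reduce(base, seq):
--     return (base[0] + "_" + seq[0], base[1], seq[2])
-- ===== Notes on version B (the rewrite author's own statement) =====
-- stated objective: simpler
-- what changed: Replaced the recursive generator that interleaves yielding with building the next level inside one for-loop by an iterative level-by-level worklist loop: yield the whole current frontier, then build the next frontier with a single comprehension over it.
import Mathlib
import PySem

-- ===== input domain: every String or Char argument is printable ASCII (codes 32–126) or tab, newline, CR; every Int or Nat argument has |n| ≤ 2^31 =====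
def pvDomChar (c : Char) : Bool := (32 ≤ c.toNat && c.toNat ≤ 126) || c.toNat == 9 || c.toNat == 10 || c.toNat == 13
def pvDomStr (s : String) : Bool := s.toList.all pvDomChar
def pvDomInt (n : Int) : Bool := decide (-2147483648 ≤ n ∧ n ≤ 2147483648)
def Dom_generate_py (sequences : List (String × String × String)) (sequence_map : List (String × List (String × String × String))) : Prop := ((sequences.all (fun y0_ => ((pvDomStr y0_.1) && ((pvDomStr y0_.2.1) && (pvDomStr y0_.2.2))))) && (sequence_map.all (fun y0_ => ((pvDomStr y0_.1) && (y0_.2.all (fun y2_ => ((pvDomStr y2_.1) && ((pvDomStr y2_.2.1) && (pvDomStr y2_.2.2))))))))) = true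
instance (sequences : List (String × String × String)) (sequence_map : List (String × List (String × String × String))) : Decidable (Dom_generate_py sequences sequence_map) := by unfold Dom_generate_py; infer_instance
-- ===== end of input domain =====

-- B replaces A's recursive generator (yield interleaved with building the next level) by an
-- iterative level-by-level worklist loop with a comprehension; objective: simpler. Return value only
-- (both Pythons are generators; the port lists their yields). Both ports carry the same fuel bound
-- (sequence_map.length + 1) guarding the recursion/loop that Python leaves unbounded (on cyclic maps Python
-- recurses without bound); the two ports are proved equal for every input.

-- ===== PORT A =====
def pyReduce (base seq : String × String × String) : String × String × String :=
  (base.1 ++ "_" ++ seq.1, base.2.1, seq.2.2)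

-- literal port of A's recursion; the fuel argument only makes the recursion total
def genA : Nat → List (String × String × String) → List (String × List (String × String × String)) → List (String × String × String)
  | 0, _, _ => []
  | Nat.succ fuel, sequences, sequence_map =>
    let p := sequences.foldl (fun acc seq =>
      let acc' := (acc.1 ++ [seq], acc.2)          -- yield seq
      match (PySem.Dict.mk sequence_map).get? seq.2.2 with   -- if end in sequence_map
      | some lst => (acc'.1, lst.foldl (fun nxt next_seq => nxt ++ [pyReduce seq next_seq]) acc'.2)
      | none => acc') ([], [])
    if p.2.isEmpty then p.1 else p.1 ++ genA fuel p.2 sequence_map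

def generate_py (sequences : List (String × String × String)) (sequence_map : List (String × List (String × String × String))) : List (String × String × String) :=
  genA (sequence_map.length + 1) sequences sequence_map

-- ===== PORT B =====
def altReduce (base seq : String × String × String) : String × String × String :=
  (base.1 ++ "_" ++ seq.1, base.2.1, seq.2.2)

-- the comprehension building the next frontier from one element
def altExpand (sequence_map : List (String × List (String × String × String))) (s : String × String × String) : List (String × String × String) :=
  match (PySem.Dict.mk sequence_map).get? s.2.2 with
  | some lst => lst.map (altReduce s)
  | none => []

-- the while loop, tail-recursive on the frontier with an output accumulator; fuel as in port A
def genB : Nat → List (String × String × String) → List (String × List (String × String × String)) → List (String × String × String) → List (String × String × String)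
  | 0, _, _, acc => acc
  | Nat.succ fuel, frontier, sequence_map, acc =>
    if frontier.isEmpty then acc
    else genB fuel (frontier.flatMap (altExpand sequence_map)) sequence_map (acc ++ frontier)

def generate_py_alt (sequences : List (String × String × String)) (sequence_map : List (String × List (String × String × String))) : List (String × String × String) :=
  genB (sequence_map.length + 1) sequences sequence_map []

-- ===== PRECONDITION & SPEC =====
def Spec_generate_py (sequences : List (String × String × String)) (sequence_map : List (String × List (String × String × String))) (out : List (String × String × String)) : Prop := out = generate_py_alt sequences sequence_map
instance (sequences : List (String × String × String)) (sequence_map : List (String × List (String × String × String))) (out : List (String × String × String)) : Decidable (Spec_generate_py sequences sequence_map out) := by unfold Spec_generate_py; infer_instance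

-- ===== CLAIM (what is proved, stated in full; the proofs are below) =====
def Claim_equal_generate_py : Prop := ∀ (sequences : List (String × String × String)) (sequence_map : List (String × List (String × String × String))), Dom_generate_py sequences sequence_map → Spec_generate_py sequences sequence_map (generate_py sequences sequence_map)

-- ===== LEMMAS AND PROOFS =====
theorem innerFoldl (g : (String × String × String) → (String × String × String))
    (lst : List (String × String × String)) (n : List (String × String × String)) :
    lst.foldl (fun nxt x => nxt ++ [g x]) n = n ++ lst.map g := by
  induction lst generalizing n with
  | nil => simp
  | cons x t ih => simp [ih]

theorem levelA (m : List (String × List (String × String × String)))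
    (seqs o n : List (String × String × String)) :
    seqs.foldl (fun acc seq =>
      let acc' := (acc.1 ++ [seq], acc.2)
      match (PySem.Dict.mk m).get? seq.2.2 with
      | some lst => (acc'.1, lst.foldl (fun nxt next_seq => nxt ++ [pyReduce seq next_seq]) acc'.2)
      | none => acc') (o, n)
    = (o ++ seqs, n ++ seqs.flatMap (altExpand m)) := by
  induction seqs generalizing o n with
  | nil => simp
  | cons s t ih =>
    simp only [List.foldl_cons]
    cases h : (PySem.Dict.mk m).get? s.2.2 with
    | none =>
      show List.foldl _ (o ++ [s], n) t = _
      rw [ih]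
      simp [altExpand, h]
    | some lst =>
      show List.foldl _ (o ++ [s], List.foldl (fun nxt next_seq => nxt ++ [pyReduce s next_seq]) n lst) t = _
      rw [innerFoldl]
      rw [ih]
      simp [altExpand, h, pyReduce, altReduce]

theorem genA_nil (m : List (String × List (String × String × String))) (f : Nat) :
    genA f [] m = [] := by
  cases f <;> simp [genA]

theorem genB_eq (m : List (String × List (String × String × String))) :
    ∀ (F : Nat) (L acc : List (String × String × String)),
      genB F L m acc = acc ++ genA F L m := by
  intro F
  induction F with
  | zero => intro L acc; simp [genA, genB]
  | succ f ih =>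
    intro L acc
    by_cases hL : L.isEmpty
    · rw [List.isEmpty_iff] at hL
      subst hL
      simp [genA, genB]
    · simp only [genA, genB, hL, levelA, ih]
      by_cases hN : (L.flatMap (altExpand m)).isEmpty
      · rw [List.isEmpty_iff] at hN
        rw [hN]
        simp [genA_nil]
      · simp [hN, List.append_assoc]

-- ===== VERDICT (by name: the statement is the Claim_ definition above) =====
theorem generate_py_spec : Claim_equal_generate_py := by
  intro sequences sequence_map _
  unfold Spec_generate_py generate_py generate_py_alt
  rw [genB_eq]
  simp
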